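-- pv_equiv track=rewrite | github.com/jwohlin2/CAD_Quoting_Tool | tests/render/test_render_sections.py | _extract_snapshot_block
-- ===== SOURCE A (Python) =====
-- def _extract_snapshot_block(text: str, header: str) -> list[str]:
--     lines = text.splitlines()
--     start = None
--     for index, line in enumerate(lines):
--         if line.strip() == header:
--             start = index
--             break
--     if start is None:
--         return []
--     collected: list[str] = []
--     for line in lines[start:]:
--         collected.append(line)
--         if not line.strip() and len(collected) > 1:
--             break
--     return collected
-- ===== SOURCE B (Python) =====
-- def _extract_snapshot_block(text: str, header: str) -> list[str]:
--     out: list[str] = []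
--     state = 0  # 0 = seeking header, 1 = collecting block, 2 = done
--     for line in text.splitlines():
--         if state == 0:
--             if line.strip() == header:
--                 out.append(line)
--                 state = 1
--         elif state == 1:
--             out.append(line)
--             if not line.strip():
--                 state = 2
--     return out
-- ===== Notes on version B (the rewrite author's own statement) =====
-- stated objective: alternative
-- what changed: Replaces A's two-stage scan (find the header index, then re-traverse lines[start:] appending with a break) by a single left-to-right pass driven by a three-state machine (seeking/collecting/done) that never re-slices or revisits a line.
import Mathlib
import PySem

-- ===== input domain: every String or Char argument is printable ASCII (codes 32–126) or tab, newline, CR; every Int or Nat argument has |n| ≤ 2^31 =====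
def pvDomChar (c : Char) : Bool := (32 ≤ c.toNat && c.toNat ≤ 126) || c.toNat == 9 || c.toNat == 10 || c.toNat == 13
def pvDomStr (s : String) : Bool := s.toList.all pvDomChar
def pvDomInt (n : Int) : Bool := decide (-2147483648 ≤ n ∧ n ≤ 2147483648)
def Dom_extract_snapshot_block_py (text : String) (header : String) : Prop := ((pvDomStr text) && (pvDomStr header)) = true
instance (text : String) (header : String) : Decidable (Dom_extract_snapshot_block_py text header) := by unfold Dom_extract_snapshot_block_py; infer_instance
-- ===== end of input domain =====

-- B replaces A's find-then-re-slice two-stage scan by one pass with a three-state machine; alternative decomposition, same cost.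

-- ===== PORT A =====
-- first loop of A: enumerate with break, carrying the running index
def pvFindStartA : List String → String → Nat → Option Nat
  | [], _, _ => none
  | l :: rest, h, i => if PySem.Str.strip l = h then some i else pvFindStartA rest h (i + 1)

-- second loop of A: append each line, break after a blank line once more than one line is collected
def pvCollectA : List String → List String → List String
  | [], acc => acc
  | l :: rest, acc =>
    let acc' := acc ++ [l]
    if PySem.Str.strip l = "" ∧ acc'.length > 1 then acc' else pvCollectA rest acc'

def extract_snapshot_block_py (text : String) (header : String) : List String :=
  let lines := PySem.Str.splitlines text
  match pvFindStartA lines header 0 with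
  | none => []
  | some start => pvCollectA (PySem.List.slice lines (some (start : Int)) none) []

-- ===== PORT B =====
-- B's loop body: state 0 = seeking header, 1 = collecting block, 2 = done
def pvStepB (header : String) (st : List String × Nat) (line : String) : List String × Nat :=
  if st.2 = 0 then
    if PySem.Str.strip line = header then (st.1 ++ [line], 1) else st
  else if st.2 = 1 then
    let out := st.1 ++ [line]
    if PySem.Str.strip line = "" then (out, 2) else (out, 1)
  else st

def extract_snapshot_block_py_alt (text : String) (header : String) : List String :=
  ((PySem.Str.splitlines text).foldl (pvStepB header) ([], 0)).1

-- ===== PRECONDITION & SPEC =====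
def Spec_extract_snapshot_block_py (text : String) (header : String) (out : List String) : Prop := out = extract_snapshot_block_py_alt text header
instance (text : String) (header : String) (out : List String) : Decidable (Spec_extract_snapshot_block_py text header out) := by unfold Spec_extract_snapshot_block_py; infer_instance

-- ===== CLAIM (what is proved, stated in full; the proofs are below) =====
def Claim_equal_extract_snapshot_block_py : Prop := ∀ (text : String) (header : String), Dom_extract_snapshot_block_py text header → Spec_extract_snapshot_block_py text header (extract_snapshot_block_py text header)

-- ===== LEMMAS AND PROOFS =====

-- proof-only characterisation: the block = header line plus lines through the first following blank
def pvUpToBlank : List String → List String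
  | [] => []
  | l :: rest => if PySem.Str.strip l = "" then [l] else l :: pvUpToBlank rest

def pvBlock (h : String) : List String → List String
  | [] => []
  | l :: rest => if PySem.Str.strip l = h then l :: pvUpToBlank rest else pvBlock h rest

-- B side --------------------------------------------------------------------

lemma foldB_done (h : String) (ls : List String) (out : List String) :
    ls.foldl (pvStepB h) (out, 2) = (out, 2) := by
  induction ls with
  | nil => rfl
  | cons l rest ih => simpa [pvStepB] using ih

lemma foldB_collect (h : String) (ls : List String) (out : List String) :
    (ls.foldl (pvStepB h) (out, 1)).1 = out ++ pvUpToBlank ls := by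
  induction ls generalizing out with
  | nil => simp [pvUpToBlank]
  | cons l rest ih =>
    by_cases hb : PySem.Str.strip l = ""
    · simp [List.foldl, pvStepB, hb, foldB_done, pvUpToBlank]
    · simp [List.foldl, pvStepB, hb, pvUpToBlank, ih]

lemma foldB_seek (h : String) (ls : List String) (out : List String) :
    (ls.foldl (pvStepB h) (out, 0)).1 = out ++ pvBlock h ls := by
  induction ls generalizing out with
  | nil => simp [pvBlock]
  | cons l rest ih =>
    by_cases hh : PySem.Str.strip l = h
    · simp [List.foldl, pvStepB, hh, pvBlock, foldB_collect]
    · simp [List.foldl, pvStepB, hh, pvBlock, ih]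

-- A side --------------------------------------------------------------------

lemma collect_ne_nil (ls acc : List String) (hacc : acc ≠ []) :
    pvCollectA ls acc = acc ++ pvUpToBlank ls := by
  induction ls generalizing acc with
  | nil => simp [pvCollectA, pvUpToBlank]
  | cons l rest ih =>
    have hpos : 0 < acc.length := List.length_pos_of_ne_nil hacc
    by_cases hc : PySem.Str.strip l = ""
    · have hstep : pvCollectA (l :: rest) acc = acc ++ [l] := by
        simp only [pvCollectA]
        rw [if_pos ⟨hc, by simp; omega⟩]
      rw [hstep]
      simp [pvUpToBlank, hc]
    · have h1 : pvCollectA (l :: rest) acc = pvCollectA rest (acc ++ [l]) := by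
        simp [pvCollectA, hc]
      rw [h1, ih _ (by simp), pvUpToBlank]
      simp [hc]

lemma collect_cons (l : String) (rest : List String) :
    pvCollectA (l :: rest) [] = l :: pvUpToBlank rest := by
  simp only [pvCollectA]
  have : ¬ (PySem.Str.strip l = "" ∧ (([] : List String) ++ [l]).length > 1) := by simp
  rw [if_neg this]
  simpa using collect_ne_nil rest [l] (by simp)

lemma findA_block (h : String) (ls : List String) (i : Nat) :
    (match pvFindStartA ls h i with
     | none => ([] : List String)
     | some s => pvCollectA (ls.drop (s - i)) []) = pvBlock h ls := by
  induction ls generalizing i with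
  | nil => simp [pvFindStartA, pvBlock]
  | cons l rest ih =>
    by_cases hh : PySem.Str.strip l = h
    · simp [pvFindStartA, hh, pvBlock, collect_cons]
    · simp only [pvFindStartA, hh, pvBlock, if_false]
      rw [← ih (i + 1)]
      cases hf : pvFindStartA rest h (i + 1) with
      | none => simp
      | some s =>
        have hs : i + 1 ≤ s := by
          clear ih
          induction rest generalizing i with
          | nil => simp [pvFindStartA] at hf
          | cons a b ihr =>
            simp only [pvFindStartA] at hf
            split_ifs at hf with hc
            · cases hf; omega
            · have := ihr _ hf; omega
        simp only
        have : s - i = (s - (i + 1)) + 1 := by omega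
        rw [this, List.drop_succ_cons]

-- main ----------------------------------------------------------------------

lemma pvMain (lines : List String) (header : String) :
    (match pvFindStartA lines header 0 with
     | none => []
     | some start => pvCollectA (PySem.List.slice lines (some (start : Int)) none) []) =
    (lines.foldl (pvStepB header) ([], 0)).1 := by
  rw [foldB_seek, ← findA_block header lines 0]
  cases hf : pvFindStartA lines header 0 with
  | none => rfl
  | some s => simp [PySem.List.slice_from_natCast]

-- ===== VERDICT (by name: the statement is the Claim_ definition above) =====
theorem extract_snapshot_block_py_spec : Claim_equal_extract_snapshot_block_py := by
  intro text header _
  unfold Spec_extract_snapshot_block_py extract_snapshot_block_py extract_snapshot_block_py_alt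
  exact pvMain (PySem.Str.splitlines text) header
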